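-- pv_equiv track=rewrite | github.com/javi10823/ia-agent-quote-marble-operator | api/app/modules/catalog/import_parser.py | classify_items
-- ===== SOURCE A (Python) =====
-- def classify_items(items: list[dict], sku_index: dict[str, str]) -> dict[str, list[dict]]:
--     """Classify items by target catalog using SKU matching.
--
--     Returns: {catalog_name: [items], "_unmatched": [items]}
--     """
--     classified: dict[str, list[dict]] = {"_unmatched": []}
--     for item in items:
--         sku_upper = item["sku"].upper()
--         cat = sku_index.get(sku_upper)
--         if cat:
--             classified.setdefault(cat, [])
--             classified[cat].append(item)
--         else:
--             classified["_unmatched"].append(item)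
--     return classified
-- ===== SOURCE B (Python) =====
-- def classify_items(items: list[dict], sku_index: dict[str, str]) -> dict[str, list[dict]]:
--     """Classify items by target catalog: two-phase group-by instead of incremental buckets."""
--     keyed = [(sku_index.get(item["sku"].upper()) or "_unmatched", item) for item in items]
--     order = []
--     for key, _ in keyed:
--         if key != "_unmatched" and key not in order:
--             order.append(key)
--     result = {"_unmatched": [it for k, it in keyed if k == "_unmatched"]}
--     for key in order:
--         result[key] = [it for k, it in keyed if k == key]
--     return result
-- ===== Notes on version B (the rewrite author's own statement) =====
-- stated objective: alternative
-- what changed: B replaces A's single-pass incremental dict-bucketing (setdefault + append per item) with a two-phase group-by: first tag every item with its bucket key and record first-occurrence key order, then build each group list by a filter over the tagged list.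
import Mathlib
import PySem

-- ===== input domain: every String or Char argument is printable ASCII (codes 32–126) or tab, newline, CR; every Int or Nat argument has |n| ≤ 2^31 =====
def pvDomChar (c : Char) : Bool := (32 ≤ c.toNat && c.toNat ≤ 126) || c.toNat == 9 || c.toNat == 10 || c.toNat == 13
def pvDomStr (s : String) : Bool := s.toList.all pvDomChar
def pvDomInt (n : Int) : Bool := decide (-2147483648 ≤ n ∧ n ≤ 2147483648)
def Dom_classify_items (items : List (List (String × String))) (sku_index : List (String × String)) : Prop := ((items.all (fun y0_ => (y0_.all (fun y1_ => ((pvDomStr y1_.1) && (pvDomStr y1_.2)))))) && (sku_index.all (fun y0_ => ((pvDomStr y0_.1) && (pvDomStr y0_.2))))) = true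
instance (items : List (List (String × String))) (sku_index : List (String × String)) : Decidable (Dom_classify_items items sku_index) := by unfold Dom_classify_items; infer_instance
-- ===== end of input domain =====

-- B: two-phase group-by (tag items with bucket keys, record first-occurrence key order, filter per key)
-- instead of A's incremental dict-bucketing single pass; same return value, no speed claim.


-- ===== PORT A =====
-- dict lookup (first match) on the association-list encoding of a Python dict
def aGet? (d : List (String × String)) (k : String) : Option String :=
  (d.find? (fun p => p.1 == k)).map (·.2)

-- Literal port of A. item["sku"] is total here via getD "" — Pre_ excludes items without a "sku" key,
-- where Python raises KeyError. 'setdefault cat []; classified[cat].append(item)' is Dict.modify cat [] (· ++ [item]).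
def classify_items (items : List (List (String × String))) (sku_index : List (String × String)) : List (String × List (List (String × String))) :=
  (items.foldl (fun classified item =>
      let sku_upper := PySem.Str.upper ((aGet? item "sku").getD "")
      match aGet? sku_index sku_upper with
      | some cat =>
          if cat ≠ "" then classified.modify cat [] (· ++ [item])
          else classified.modify "_unmatched" [] (· ++ [item])
      | none => classified.modify "_unmatched" [] (· ++ [item]))
    (PySem.Dict.mk [("_unmatched", [])])).items

-- ===== PORT B =====
def bGet? (d : List (String × String)) (k : String) : Option String :=
  (d.find? (fun p => p.1 == k)).map (·.2)

-- sku_index.get(item["sku"].upper()) or "_unmatched"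
def bKey (sku_index : List (String × String)) (item : List (String × String)) : String :=
  match bGet? sku_index (PySem.Str.upper ((bGet? item "sku").getD "")) with
  | some c => if c = "" then "_unmatched" else c
  | none => "_unmatched"

def classify_items_alt (items : List (List (String × String))) (sku_index : List (String × String)) : List (String × List (List (String × String))) :=
  let keyed := items.map (fun item => (bKey sku_index item, item))
  let order := keyed.foldl (fun acc p => if p.1 ≠ "_unmatched" ∧ p.1 ∉ acc then acc ++ [p.1] else acc) []
  ("_unmatched", (keyed.filter (fun p => p.1 == "_unmatched")).map (·.2)) ::
    order.map (fun k => (k, (keyed.filter (fun p => p.1 == k)).map (·.2)))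

-- ===== PRECONDITION & SPEC =====
-- Pre_ excludes exactly the items without a "sku" key, on which Python's item["sku"] raises KeyError.
def Pre_classify_items (items : List (List (String × String))) (sku_index : List (String × String)) : Prop :=
  ∀ item ∈ items, (item.find? (fun p => p.1 == "sku")).isSome = true
instance (items : List (List (String × String))) (sku_index : List (String × String)) : Decidable (Pre_classify_items items sku_index) := by unfold Pre_classify_items; infer_instance
def pvWitness_classify_items : (List (List (String × String))) × (List (String × String)) :=
  ([[("sku", "ab")], [("sku", "x")]], [("AB", "cat1")])

def Spec_classify_items (items : List (List (String × String))) (sku_index : List (String × String)) (out : List (String × List (List (String × String)))) : Prop := out = classify_items_alt items sku_index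
instance (items : List (List (String × String))) (sku_index : List (String × String)) (out : List (String × List (List (String × String)))) : Decidable (Spec_classify_items items sku_index out) := by unfold Spec_classify_items; infer_instance

-- ===== CLAIM (what is proved, stated in full; the proofs are below) =====
def Claim_equal_classify_items : Prop := ∀ (items : List (List (String × String))) (sku_index : List (String × String)), Dom_classify_items items sku_index → Pre_classify_items items sku_index → Spec_classify_items items sku_index (classify_items items sku_index)

-- ===== LEMMAS AND PROOFS =====

-- A's loop body is a single modify at the key bKey computes.
theorem stepA_eq_modify (sku_index : List (String × String))
    (cl : PySem.Dict String (List (List (String × String)))) (item : List (String × String)) :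
    (let sku_upper := PySem.Str.upper ((aGet? item "sku").getD "")
     match aGet? sku_index sku_upper with
     | some cat =>
         if cat ≠ "" then cl.modify cat [] (· ++ [item])
         else cl.modify "_unmatched" [] (· ++ [item])
     | none => cl.modify "_unmatched" [] (· ++ [item]))
    = cl.modify (bKey sku_index item) [] (· ++ [item]) := by
  show _ = cl.modify (bKey sku_index item) [] (· ++ [item])
  unfold bKey bGet? aGet?
  cases h : (sku_index.find? (fun p => p.1 == PySem.Str.upper (((item.find? (fun p => p.1 == "sku")).map (·.2)).getD ""))).map (·.2) with
  | none => simp [h]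
  | some c =>
    simp only [h]
    by_cases hc : c = "" <;> simp [hc]

-- B's 'order' accumulator is the deduped key list with "_unmatched" filtered out.
theorem order_eq_filter_ofList (keyed : List (String × List (String × String))) :
    keyed.foldl (fun acc p => if p.1 ≠ "_unmatched" ∧ p.1 ∉ acc then acc ++ [p.1] else acc) [] =
      (PySem.Set.ofList (keyed.map (·.1))).filter (fun k => !(k == "_unmatched")) := by
  induction keyed using List.reverseRecOn with
  | nil => simp [PySem.Set.ofList_nil]
  | append_singleton ks k ih =>
    rw [List.foldl_append, List.foldl_cons, List.foldl_nil, ih, List.map_append,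
        List.map_cons, List.map_nil, PySem.Set.ofList_append_singleton]
    by_cases hu : k.1 = "_unmatched"
    · rw [if_neg (by simp [hu])]
      rw [PySem.Set.add_eq_ite]
      split
      · rfl
      · rw [List.filter_append]; simp [hu]
    · by_cases hm : k.1 ∈ PySem.Set.ofList (ks.map (·.1))
      · rw [PySem.Set.add_of_mem hm, if_neg]
        simp only [not_and, not_not]
        intro _; simp [List.mem_filter, hm, hu]
      · rw [PySem.Set.add_of_not_mem hm, if_pos, List.filter_append]
        · simp [hu]
        · refine ⟨hu, ?_⟩
          intro hin
          exact hm ((List.mem_filter.mp hin).1)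

-- the initial dict looks up [] at every key
theorem getD_init (c : String) :
    (PySem.Dict.mk [("_unmatched", ([] : List (List (String × String))))]).getD c [] = [] := by
  rw [PySem.Dict.getD_eq_get?_getD, PySem.Dict.get?_mk_cons]
  split <;> rfl

-- ===== VERDICT (by name: the statement is the Claim_ definition above) =====
theorem classify_items_spec : Claim_equal_classify_items := by
  intro items sku_index _ _
  show classify_items items sku_index = classify_items_alt items sku_index
  set keyed := items.map (fun item => (bKey sku_index item, item)) with hk
  set d0 : PySem.Dict String (List (List (String × String))) := PySem.Dict.mk [("_unmatched", [])] with hd0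
  set D := keyed.foldl (fun d p => d.modify p.1 [] (· ++ [p.2])) d0 with hD
  have hnd0 : d0.keys.Nodup := by rw [hd0]; simp [PySem.Dict.keys]
  have hndD : D.keys.Nodup := by
    rw [hD]
    exact PySem.Dict.nodup_keys_foldl_modify_key keyed (·.1) [] (fun d p => (· ++ [p.2])) d0 hnd0
  have hkeys : D.keys = PySem.Set.update d0.keys (keyed.map (·.1)) := by
    rw [hD]
    exact PySem.Dict.keys_foldl_modify_key keyed (·.1) [] (fun d p => (· ++ [p.2])) d0
  have hgetD : ∀ c, D.getD c [] = (keyed.filter (fun p => p.1 == c)).map (·.2) := by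
    intro c
    rw [hD, PySem.Dict.getD_foldl_modify_append, hd0, getD_init, List.nil_append]
  -- A's side equals D.items
  have hA : classify_items items sku_index = D.items := by
    unfold classify_items
    congr 1
    have hfun : (fun (classified : PySem.Dict String (List (List (String × String)))) (item : List (String × String)) =>
        let sku_upper := PySem.Str.upper ((aGet? item "sku").getD "")
        match aGet? sku_index sku_upper with
        | some cat =>
            if cat ≠ "" then classified.modify cat [] (· ++ [item])
            else classified.modify "_unmatched" [] (· ++ [item])
        | none => classified.modify "_unmatched" [] (· ++ [item]))
        = fun cl item => cl.modify (bKey sku_index item) [] (· ++ [item]) :=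
      funext fun cl => funext fun item => stepA_eq_modify sku_index cl item
    rw [hfun, hD, hk, List.foldl_map]
  -- B's side with 'order' rewritten to set form
  have halt : classify_items_alt items sku_index =
      ("_unmatched", (keyed.filter (fun p => p.1 == "_unmatched")).map (·.2)) ::
        ((PySem.Set.ofList (keyed.map (·.1))).filter (fun k => !(k == "_unmatched"))).map
          (fun k => (k, (keyed.filter (fun p => p.1 == k)).map (·.2))) := by
    show (("_unmatched", (keyed.filter (fun p => p.1 == "_unmatched")).map (·.2)) ::
        (keyed.foldl (fun acc p => if p.1 ≠ "_unmatched" ∧ p.1 ∉ acc then acc ++ [p.1] else acc) []).map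
          (fun k => (k, (keyed.filter (fun p => p.1 == k)).map (·.2)))) = _
    rw [order_eq_filter_ofList]
  rw [hA, halt]
  have hitems : D.items = D.keys.map (fun k => (k, D.getD k [])) :=
    PySem.Dict.items_eq_map_keys D hndD []
  have hkeys0 : d0.keys = ["_unmatched"] := by rw [hd0]; simp [PySem.Dict.keys]
  have hfilt : (keyed.map (·.1) |> PySem.Set.ofList).filter
        (fun y => !(PySem.Set.contains ["_unmatched"] y)) =
      (PySem.Set.ofList (keyed.map (·.1))).filter (fun k => !(k == "_unmatched")) := by
    apply List.filter_congr
    intro x _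
    by_cases h : x = "_unmatched" <;> simp [PySem.Set.contains, h]
  rw [hitems, hkeys, hkeys0, PySem.Set.update_eq_append_filter, hfilt,
      List.map_append, List.map_cons, List.map_nil, List.singleton_append]
  congr 1
  · rw [hgetD]
  · apply List.map_congr_left
    intro k _
    rw [hgetD]
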